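-- pv_equiv track=rewrite | github.com/onewaymyway/Graph2Tree | math23k/src/data_utils.py | create_group
-- ===== SOURCE A (Python) =====
-- def create_group(input_seq, num_pos):
--     group = []
--     d = 3
--     for i in num_pos:
--         spos = i - d
--         for p in range(0, 2 * d + 1):
--             p = p + spos
--             if p > 0 and p < len(input_seq):
--                 if p not in group:
--                     group.append(p)
--     return group
-- ===== SOURCE B (Python) =====
-- def create_group(input_seq, num_pos):
--     # A position is emitted while handling center i iff it lies in i's clipped
--     # window and is NOT covered by any earlier center's window (|p - j| <= 3).
--     n = len(input_seq)
--     out = []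
--     prev = []
--     for i in num_pos:
--         for p in range(max(i - 3, 1), min(i + 3, n - 1) + 1):
--             if all(abs(p - j) > 3 for j in prev):
--                 out.append(p)
--         prev.append(i)
--     return out
-- ===== Notes on version B (the rewrite author's own statement) =====
-- stated objective: alternative
-- what changed: B never tests membership in the growing result: it emits a position from the current center's window (clipped to the valid bounds with max/min) exactly when no earlier number-position's window covers it (all |p - j| > 3 for earlier centers j), replacing A's append-if-not-in-group dedup with a coverage test against the earlier centers.
import Mathlib
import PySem

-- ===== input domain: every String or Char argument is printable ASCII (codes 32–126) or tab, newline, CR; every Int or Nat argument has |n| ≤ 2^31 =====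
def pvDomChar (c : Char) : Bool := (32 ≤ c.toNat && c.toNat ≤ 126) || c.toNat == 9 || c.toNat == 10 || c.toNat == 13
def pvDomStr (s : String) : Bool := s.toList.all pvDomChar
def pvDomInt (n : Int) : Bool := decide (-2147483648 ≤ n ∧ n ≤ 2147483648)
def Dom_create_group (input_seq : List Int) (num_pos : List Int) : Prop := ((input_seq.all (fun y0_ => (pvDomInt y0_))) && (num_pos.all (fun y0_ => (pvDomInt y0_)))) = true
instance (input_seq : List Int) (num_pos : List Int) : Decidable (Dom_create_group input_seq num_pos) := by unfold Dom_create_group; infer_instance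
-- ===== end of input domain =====

-- B drops A's dedup-by-membership in the growing result: it emits p from the k-th
-- center's clipped window iff no EARLIER center's window covers p (|p - j| > 3) —
-- a different characterisation of the same output (objective: alternative).

-- ===== PORT A =====
def create_group (input_seq : List Int) (num_pos : List Int) : List Int :=
  let d : Int := 3
  num_pos.foldl (fun group i =>
    let spos := i - d
    (PySem.List.pyRange 0 (2 * d + 1) 1).foldl (fun g p0 =>
      let p := p0 + spos
      if p > 0 ∧ p < PySem.List.len input_seq then
        if p ∉ g then g ++ [p] else g
      else g) group) []

-- ===== PORT B =====
def create_group_alt (input_seq : List Int) (num_pos : List Int) : List Int :=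
  let n := PySem.List.len input_seq
  (num_pos.foldl (fun (s : List Int × List Int) i =>
      ((PySem.List.pyRange (max (i - 3) 1) (min (i + 3) (n - 1) + 1) 1).foldl
         (fun out p => if s.2.all (fun j => decide (3 < |p - j|)) then out ++ [p] else out) s.1,
       s.2 ++ [i])) ([], [])).1

-- ===== PRECONDITION & SPEC =====
def Spec_create_group (input_seq : List Int) (num_pos : List Int) (out : List Int) : Prop := out = create_group_alt input_seq num_pos
instance (input_seq : List Int) (num_pos : List Int) (out : List Int) : Decidable (Spec_create_group input_seq num_pos out) := by unfold Spec_create_group; infer_instance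

-- ===== CLAIM (what is proved, stated in full; the proofs are below) =====
def Claim_equal_create_group : Prop := ∀ (input_seq : List Int) (num_pos : List Int), Dom_create_group input_seq num_pos → Spec_create_group input_seq num_pos (create_group input_seq num_pos)

-- ===== LEMMAS AND PROOFS =====

-- A's inner-loop body as a named step function
def pvStep (n : Int) (g : List Int) (p : Int) : List Int :=
  if p > 0 ∧ p < n then (if p ∉ g then g ++ [p] else g) else g

-- pointwise-equal step functions fold alike
theorem pvFoldl_congr {α β : Type} (xs : List α) (b : β) (f f' : β → α → β)
    (h : ∀ c a, f c a = f' c a) : xs.foldl f b = xs.foldl f' b := by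
  induction xs generalizing b with
  | nil => rfl
  | cons x xs ih => simp only [List.foldl_cons, h, ih]

-- A's inner loop over range(0,7) with the shift equals folding pvStep over range(i-3, i+4)
theorem pvInner (n i : Int) (g : List Int) :
    (PySem.List.pyRange 0 (2 * 3 + 1) 1).foldl (fun g p0 => pvStep n g (p0 + (i - 3))) g
      = (PySem.List.pyRange (i - 3) (i + 3 + 1) 1).foldl (pvStep n) g := by
  rw [PySem.List.pyRange_one, PySem.List.pyRange_one]
  have h7 : ((2 * 3 + 1 : Int) - 0).toNat = 7 := by decide
  have h7' : ((i + 3 + 1) - (i - 3)).toNat = 7 := by omega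
  rw [h7, h7', List.foldl_map, List.foldl_map]
  apply pvFoldl_congr
  intro c k
  congr 1
  omega

-- folding pvStep over a duplicate-free list appends exactly the new in-bounds elements
theorem pvWinA (n : Int) (xs : List Int) (g : List Int) (hnd : xs.Nodup) :
    xs.foldl (pvStep n) g
      = g ++ xs.filter (fun p => decide (0 < p) && decide (p < n) && decide (p ∉ g)) := by
  induction xs generalizing g with
  | nil => simp
  | cons x xs ih =>
    rcases List.nodup_cons.mp hnd with ⟨hx, hxs⟩
    simp only [List.foldl_cons, List.filter_cons]
    by_cases h1 : 0 < x
    · by_cases h2 : x < n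
      · by_cases h3 : x ∈ g
        · have hs : pvStep n g x = g := by simp [pvStep, h1, h2, h3]
          rw [hs, ih _ hxs]
          simp [h1, h2, h3]
        · have hs : pvStep n g x = g ++ [x] := by simp [pvStep, h1, h2, h3]
          rw [hs, ih _ hxs]
          have hf : xs.filter (fun p => decide (0 < p) && decide (p < n) && decide (p ∉ g ++ [x]))
              = xs.filter (fun p => decide (0 < p) && decide (p < n) && decide (p ∉ g)) := by
            apply List.filter_congr
            intro p hp
            have hne : p ≠ x := fun e => hx (e ▸ hp)
            simp [List.mem_append, hne]
          rw [hf]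
          simp [h1, h2, h3, List.append_assoc]
      · have hs : pvStep n g x = g := by simp [pvStep, h2]
        rw [hs, ih _ hxs]
        simp [h2]
    · have hs : pvStep n g x = g := by
        simp only [pvStep]
        rw [if_neg]
        exact fun h => h1 h.1
      rw [hs, ih _ hxs]
      simp [h1]
  -- step disambiguation: pvStep with the Prop-if matches the port's body definitionally

-- filtering the raw window by the bounds equals the clipped window
theorem pvClip (n i : Int) :
    (PySem.List.pyRange (i - 3) (i + 3 + 1) 1).filter (fun p => decide (0 < p) && decide (p < n))
      = PySem.List.pyRange (max (i - 3) 1) (min (i + 3) (n - 1) + 1) 1 := by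
  have hperm : ((PySem.List.pyRange (i - 3) (i + 3 + 1) 1).filter
        (fun p => decide (0 < p) && decide (p < n))).Perm
      (PySem.List.pyRange (max (i - 3) 1) (min (i + 3) (n - 1) + 1) 1) := by
    rw [List.perm_ext_iff_of_nodup ((PySem.List.nodup_pyRange_one _ _).filter _)
        (PySem.List.nodup_pyRange_one _ _)]
    intro x
    simp only [List.mem_filter, PySem.List.mem_pyRange_one, Bool.and_eq_true, decide_eq_true_eq]
    omega
  exact List.Perm.eq_of_pairwise (fun a b _ _ h1 h2 => by omega)
    ((PySem.List.pairwise_lt_pyRange_one _ _).filter _)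
    (PySem.List.pairwise_lt_pyRange_one _ _) hperm

-- under the coverage invariant, "not yet in the result" is "far from every earlier center"
theorem pvCond (n : Int) (g prev : List Int)
    (inv : ∀ p : Int, p ∈ g ↔ (0 < p ∧ p < n ∧ ∃ j ∈ prev, |p - j| ≤ 3)) (p : Int) :
    (decide (0 < p) && decide (p < n) && decide (p ∉ g))
      = (prev.all (fun j => decide (3 < |p - j|)) && (decide (0 < p) && decide (p < n))) := by
  by_cases h1 : 0 < p
  · by_cases h2 : p < n
    · by_cases h3 : p ∈ g
      · have hall : prev.all (fun j => decide (3 < |p - j|)) = false := by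
          obtain ⟨_, _, j, hj, hle⟩ := (inv p).mp h3
          rw [List.all_eq_false]
          refine ⟨j, hj, ?_⟩
          simp only [decide_eq_true_eq]
          omega
        simp [h1, h2, h3, hall]
      · have hall : prev.all (fun j => decide (3 < |p - j|)) = true := by
          rw [List.all_eq_true]
          intro j hj
          simp only [decide_eq_true_eq]
          by_contra hle
          exact h3 ((inv p).mpr ⟨h1, h2, j, hj, by omega⟩)
        simp [h1, h2, h3, hall]
    · simp [h2]
  · simp [h1]

-- main loop correspondence: A's fold from g equals B's fold from (g, prev)
theorem pvMain (n : Int) (ns : List Int) (g prev : List Int)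
    (inv : ∀ p : Int, p ∈ g ↔ (0 < p ∧ p < n ∧ ∃ j ∈ prev, |p - j| ≤ 3)) :
    ns.foldl (fun g i => (PySem.List.pyRange (i - 3) (i + 3 + 1) 1).foldl (pvStep n) g) g
      = (ns.foldl (fun (s : List Int × List Int) i =>
          (s.1 ++ (PySem.List.pyRange (max (i - 3) 1) (min (i + 3) (n - 1) + 1) 1).filter
              (fun p => s.2.all (fun j => decide (3 < |p - j|))), s.2 ++ [i])) (g, prev)).1 := by
  induction ns generalizing g prev with
  | nil => rfl
  | cons i ns ih =>
    simp only [List.foldl_cons]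
    have hstep : (PySem.List.pyRange (i - 3) (i + 3 + 1) 1).foldl (pvStep n) g
        = g ++ (PySem.List.pyRange (max (i - 3) 1) (min (i + 3) (n - 1) + 1) 1).filter
            (fun p => prev.all (fun j => decide (3 < |p - j|))) := by
      rw [pvWinA n _ g (PySem.List.nodup_pyRange_one _ _)]
      congr 1
      rw [List.filter_congr (fun p _ => pvCond n g prev inv p), ← List.filter_filter, pvClip]
    rw [hstep]
    apply ih
    intro p
    simp only [List.mem_append, List.mem_filter, PySem.List.mem_pyRange_one, inv p,
      List.all_eq_true, decide_eq_true_eq, List.mem_singleton]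
    constructor
    · rintro (⟨h1, h2, j, hj, hle⟩ | ⟨⟨hlo, hhi⟩, hall⟩)
      · exact ⟨h1, h2, j, Or.inl hj, hle⟩
      · exact ⟨by omega, by omega, i, Or.inr rfl, abs_le.mpr ⟨by omega, by omega⟩⟩
    · rintro ⟨h1, h2, j, hj | rfl, hle⟩
      · exact Or.inl ⟨h1, h2, j, hj, hle⟩
      · rw [abs_le] at hle
        by_cases hc : ∃ j ∈ prev, |p - j| ≤ 3
        · rcases hc with ⟨j, hjm, hle'⟩
          exact Or.inl ⟨h1, h2, j, hjm, hle'⟩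
        · push Not at hc
          refine Or.inr ⟨⟨by omega, by omega⟩, fun j hjm => by have := hc j hjm; omega⟩

-- ===== VERDICT (by name: the statement is the Claim_ definition above) =====
theorem create_group_spec : Claim_equal_create_group := by
  intro input_seq num_pos _
  unfold Spec_create_group create_group create_group_alt
  show num_pos.foldl (fun group i =>
      (PySem.List.pyRange 0 (2 * 3 + 1) 1).foldl
        (fun g p0 => pvStep (PySem.List.len input_seq) g (p0 + (i - 3))) group) []
    = (num_pos.foldl (fun (s : List Int × List Int) i =>
        ((PySem.List.pyRange (max (i - 3) 1) (min (i + 3) (PySem.List.len input_seq - 1) + 1) 1).foldl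
           (fun out p => if s.2.all (fun j => decide (3 < |p - j|)) then out ++ [p] else out) s.1,
         s.2 ++ [i])) ([], [])).1
  rw [pvFoldl_congr num_pos [] _ _ (fun g i => pvInner (PySem.List.len input_seq) i g)]
  have hB : ∀ (s : List Int × List Int) (i : Int),
      (((PySem.List.pyRange (max (i - 3) 1) (min (i + 3) (PySem.List.len input_seq - 1) + 1) 1).foldl
          (fun out p => if s.2.all (fun j => decide (3 < |p - j|)) then out ++ [p] else out) s.1,
        s.2 ++ [i]) : List Int × List Int)
      = (s.1 ++ (PySem.List.pyRange (max (i - 3) 1) (min (i + 3) (PySem.List.len input_seq - 1) + 1) 1).filter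
            (fun p => s.2.all (fun j => decide (3 < |p - j|))), s.2 ++ [i]) := by
    intro s i
    rw [PySem.List.foldl_append_if (fun p => s.2.all (fun j => decide (3 < |p - j|))) (fun p => p)]
    simp
  rw [pvFoldl_congr num_pos (([], []) : List Int × List Int) _ _ hB]
  exact pvMain (PySem.List.len input_seq) num_pos [] []
    (by intro p; simp)
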